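-- pv_equiv track=rewrite | github.com/trhys/tube_defect_analyzer | analyzer.py | cat_time_groups
-- ===== SOURCE A (Python) =====
-- def cat_time_groups(groups):
--     if groups:
--         for j in range(len(groups) -1):
--             if groups[j]:
--                 if groups[j][1] == groups[j+1][0]:
--                     groups[j].extend(groups[j+1])
--                     groups[j+1] = None
--         if None in groups:
--             while None in groups:
--                 groups.remove(None)
--             groups = cat_time_groups(groups)
--         cleaned_groups = []
--         seen = []
--         for group in groups:
--             new_group = []
--             for pair in group:
--                 if pair not in seen:
--                     new_group.append(pair)
--                     seen.append(pair)
--             cleaned_groups.append(new_group)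
--     return cleaned_groups
-- ===== SOURCE B (Python) =====
-- # Purely functional iterative fixed point + single global dedup; unlike A, B does NOT
-- # mutate the argument in place (equivalence claimed for the return value only).
-- def _merge_pass(gs):
--     out = []
--     merged = False
--     i = 0
--     while i < len(gs):
--         g = gs[i]
--         if i + 1 < len(gs) and g and g[1] == gs[i + 1][0]:
--             out.append(g + gs[i + 1])
--             merged = True
--             i += 2
--         else:
--             out.append(g)
--             i += 1
--     return out, merged
--
--
-- def cat_time_groups(groups):
--     gs = list(groups)
--     while True:
--         gs, merged = _merge_pass(gs)
--         if not merged: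
--             break
--     seen = set()
--     cleaned = []
--     for g in gs:
--         ng = []
--         for p in g:
--             if p not in seen:
--                 seen.add(p)
--                 ng.append(p)
--         cleaned.append(ng)
--     return cleaned
-- ===== Notes on version B (the rewrite author's own statement) =====
-- stated objective: faster
-- what changed: Replaces A's recursion (merge pass over None-marked slots, compaction, recursive call, re-dedup at every recursion level, all mutating the argument) by a purely functional fixed-point loop that builds each compacted pass directly, followed by a single global first-occurrence dedup using a set instead of A's list-membership seen.
-- crash fix: On an empty (falsy) input list A raises UnboundLocalError (cleaned_groups is never bound); B returns []. — e.g. on cat_time_groups([]): A raises UnboundLocalError, B returns []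
import Mathlib
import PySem

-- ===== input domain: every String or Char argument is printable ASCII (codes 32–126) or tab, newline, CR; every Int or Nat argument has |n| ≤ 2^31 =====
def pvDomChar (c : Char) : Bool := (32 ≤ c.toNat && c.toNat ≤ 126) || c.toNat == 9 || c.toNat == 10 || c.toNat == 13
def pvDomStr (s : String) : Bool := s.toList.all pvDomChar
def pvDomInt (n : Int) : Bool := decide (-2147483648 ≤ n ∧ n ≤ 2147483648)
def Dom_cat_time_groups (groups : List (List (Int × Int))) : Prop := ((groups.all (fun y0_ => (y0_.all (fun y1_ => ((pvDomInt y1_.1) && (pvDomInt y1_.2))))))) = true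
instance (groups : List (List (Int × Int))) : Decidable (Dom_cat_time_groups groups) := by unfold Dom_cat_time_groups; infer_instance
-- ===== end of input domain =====

-- B replaces A's recursion (pass, compact, recurse, re-dedup at every level) by a purely
-- functional fixed-point loop over the same merge pass followed by ONE global dedup;
-- A mutates its argument in place, B does not — equivalence is about the RETURN value only.

-- ===== PORT A =====

-- one adjacent-merge pass: merged neighbour becomes `none` (Python's None marker)
def pvPassA : List (List (Int × Int)) → List (Option (List (Int × Int)))
  | [] => []
  | [g] => [some g]
  | g :: h :: t =>
    if g ≠ [] ∧ PySem.List.pyGet? g 1 = PySem.List.pyGet? h 0 then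
      some (g ++ h) :: none :: pvPassA t
    else
      some g :: pvPassA (h :: t)

-- dedup of one group against the running `seen` list
def pvDedupGroupA : List (Int × Int) → List (Int × Int) → List (Int × Int) × List (Int × Int)
  | [], seen => ([], seen)
  | p :: t, seen =>
    if p ∈ seen then pvDedupGroupA t seen
    else
      let r := pvDedupGroupA t (seen ++ [p])
      (p :: r.1, r.2)

-- the cleaned_groups/seen loop
def pvDedupA : List (List (Int × Int)) → List (Int × Int) → List (List (Int × Int)) × List (Int × Int)
  | [], seen => ([], seen)
  | g :: t, seen =>
    let r := pvDedupGroupA g seen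
    let r' := pvDedupA t r.2
    (r.1 :: r'.1, r'.2)

theorem pvPassA_length (gs : List (List (Int × Int))) : (pvPassA gs).length = gs.length := by
  induction gs using pvPassA.induct with
  | case1 => rfl
  | case2 g => rfl
  | case3 g h t hc ih => rw [pvPassA, if_pos hc]; simp [ih]
  | case4 g h t hc ih => rw [pvPassA, if_neg (by tauto)]; simp [ih]

theorem pv_filterMap_id_lt {α : Type} (l : List (Option α)) (h : none ∈ l) :
    (l.filterMap id).length < l.length := by
  induction l with
  | nil => simp at h
  | cons a t ih =>
    cases a with
    | none =>
      simp only [List.filterMap_cons, id]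
      exact Nat.lt_succ_of_le (List.length_filterMap_le id t)
    | some x =>
      simp only [List.mem_cons, reduceCtorEq, false_or] at h
      simpa [List.filterMap_cons] using ih h

-- literal transliteration of A: guard, pass, None-compaction + recursion, per-level dedup
def cat_time_groups (groups : List (List (Int × Int))) : List (List (Int × Int)) :=
  -- Python raises UnboundLocalError on empty `groups`; that input is outside Pre_
  if groups = [] then []
  else
    let m := pvPassA groups
    let gs :=
      if hn : none ∈ m then
        cat_time_groups (m.filterMap id)
      else groups
    (pvDedupA gs []).1
termination_by groups.length
decreasing_by
  calc (m.filterMap id).length < m.length := pv_filterMap_id_lt m hn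
    _ = groups.length := pvPassA_length groups

-- ===== PORT B =====

-- Source B's _merge_pass: builds the compacted list directly, plus a merged?-flag
def pvPassB : List (List (Int × Int)) → List (List (Int × Int)) × Bool
  | [] => ([], false)
  | [g] => ([g], false)
  | g :: h :: t =>
    if g ≠ [] ∧ PySem.List.pyGet? g 1 = PySem.List.pyGet? h 0 then
      ((g ++ h) :: (pvPassB t).1, true)
    else
      let r := pvPassB (h :: t)
      (g :: r.1, r.2)

theorem pvPassB_len_le (gs : List (List (Int × Int))) : (pvPassB gs).1.length ≤ gs.length := by
  induction gs using pvPassB.induct with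
  | case1 => simp [pvPassB]
  | case2 g => simp [pvPassB]
  | case3 g h t hc ih => rw [pvPassB, if_pos hc]; simp; omega
  | case4 g h t hc ih => rw [pvPassB, if_neg (by tauto)]; simpa using ih

theorem pvPassB_lt (gs : List (List (Int × Int))) (h : (pvPassB gs).2 = true) :
    (pvPassB gs).1.length < gs.length := by
  induction gs using pvPassB.induct with
  | case1 => simp [pvPassB] at h
  | case2 g => simp [pvPassB] at h
  | case3 g h t hc ih =>
    rw [pvPassB, if_pos hc]
    simpa using Nat.lt_succ_of_le (Nat.succ_le_succ (pvPassB_len_le t))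
  | case4 g h t hc ih =>
    rw [pvPassB, if_neg (by tauto)] at h ⊢
    simpa using ih h

-- Source B's `while True` fixed-point loop
def pvLoopB (gs : List (List (Int × Int))) : List (List (Int × Int)) :=
  let r := pvPassB gs
  if h : r.2 = true then pvLoopB r.1 else r.1
termination_by gs.length
decreasing_by exact pvPassB_lt gs h

-- Source B's dedup of one group, `seen` being a Python set
def pvDedupGroupB : List (Int × Int) → PySem.Set (Int × Int) → List (Int × Int) × PySem.Set (Int × Int)
  | [], seen => ([], seen)
  | p :: t, seen =>
    if PySem.Set.contains seen p then pvDedupGroupB t seen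
    else
      let r := pvDedupGroupB t (PySem.Set.add seen p)
      (p :: r.1, r.2)

def pvDedupB : List (List (Int × Int)) → PySem.Set (Int × Int) → List (List (Int × Int)) × PySem.Set (Int × Int)
  | [], seen => ([], seen)
  | g :: t, seen =>
    let r := pvDedupGroupB g seen
    let r' := pvDedupB t r.2
    (r.1 :: r'.1, r'.2)

def cat_time_groups_alt (groups : List (List (Int × Int))) : List (List (Int × Int)) :=
  (pvDedupB (pvLoopB groups) PySem.Set.empty).1

-- ===== PRECONDITION & SPEC =====

-- forward chain check over the nonempty groups (the Bool flags an absorbed head to skip):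
-- every non-final group must hold at least two pairs unless its predecessor chains into it
-- (predecessor's second pair = its first pair), in which case the absorbed group is skipped;
-- this is exactly where A's `groups[j][1]` stays in range on every pass
def pvChainOK : Bool → List (List (Int × Int)) → Bool
  | _, [] => true
  | true, _ :: t => pvChainOK false t
  | false, [_] => true
  | false, a :: b :: t =>
    if a.length = 1 then false
    else if a[1]? = b[0]? then pvChainOK true (b :: t)
    else pvChainOK false (b :: t)

-- Pre_ holds exactly where the Python A returns: it excludes only the inputs on which A
-- raises — the empty list (UnboundLocalError), an empty group following a nonempty one
-- (IndexError on groups[j+1][0]), and a one-pair non-final group not absorbed by its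
-- predecessor (IndexError on groups[j][1]).
def Pre_cat_time_groups (groups : List (List (Int × Int))) : Prop :=
  groups ≠ [] ∧
  (∀ g ∈ groups.dropWhile (fun g => g.isEmpty), g ≠ []) ∧
  pvChainOK false (groups.dropWhile (fun g => g.isEmpty)) = true
instance (groups : List (List (Int × Int))) : Decidable (Pre_cat_time_groups groups) := by
  unfold Pre_cat_time_groups; infer_instance

def pvWitness_cat_time_groups : (List (List (Int × Int))) :=
  [[(1, 2), (2, 3)], [(2, 3), (4, 5)], [(6, 7)]]

-- On an empty (falsy) input list A raises UnboundLocalError (cleaned_groups is never bound); B returns [].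
def Raises_cat_time_groups (groups : List (List (Int × Int))) : Prop := groups = []
instance (groups : List (List (Int × Int))) : Decidable (Raises_cat_time_groups groups) := by
  unfold Raises_cat_time_groups; infer_instance

def pvRaiseWitness_cat_time_groups : (List (List (Int × Int))) := []
def pvRaiseWitnessOut_cat_time_groups : List (List (Int × Int)) := []

def Spec_cat_time_groups (groups : List (List (Int × Int))) (out : List (List (Int × Int))) : Prop := out = cat_time_groups_alt groups
instance (groups : List (List (Int × Int))) (out : List (List (Int × Int))) : Decidable (Spec_cat_time_groups groups out) := by unfold Spec_cat_time_groups; infer_instance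

-- ===== CLAIM (what is proved, stated in full; the proofs are below) =====
def Claim_equal_cat_time_groups : Prop := ∀ (groups : List (List (Int × Int))), Dom_cat_time_groups groups → Pre_cat_time_groups groups → Spec_cat_time_groups groups (cat_time_groups groups)
def Claim_raises_cat_time_groups : Prop := (∀ (groups : List (List (Int × Int))), Dom_cat_time_groups groups → Raises_cat_time_groups groups → ¬ Pre_cat_time_groups groups) ∧ (Dom_cat_time_groups (pvRaiseWitness_cat_time_groups) ∧ Raises_cat_time_groups (pvRaiseWitness_cat_time_groups) ∧ cat_time_groups_alt (pvRaiseWitness_cat_time_groups) = pvRaiseWitnessOut_cat_time_groups)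

-- ===== LEMMAS AND PROOFS =====

theorem pv_filterMap_passA (gs : List (List (Int × Int))) :
    (pvPassA gs).filterMap id = (pvPassB gs).1 := by
  induction gs using pvPassA.induct with
  | case1 => rfl
  | case2 g => rfl
  | case3 g h t hc ih => rw [pvPassA, if_pos hc, pvPassB, if_pos hc]; simpa using ih
  | case4 g h t hc ih =>
    rw [pvPassA, if_neg (by tauto), pvPassB, if_neg (by tauto)]
    simpa using ih

theorem pv_flag_passA (gs : List (List (Int × Int))) :
    (pvPassB gs).2 = true ↔ none ∈ pvPassA gs := by
  induction gs using pvPassA.induct with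
  | case1 => simp [pvPassA, pvPassB]
  | case2 g => simp [pvPassA, pvPassB]
  | case3 g h t hc ih => rw [pvPassA, if_pos hc, pvPassB, if_pos hc]; simp
  | case4 g h t hc ih =>
    rw [pvPassA, if_neg (by tauto), pvPassB, if_neg (by tauto)]
    simpa using ih

theorem pv_passA_no_merge (gs : List (List (Int × Int))) (h : ¬ none ∈ pvPassA gs) :
    pvPassA gs = gs.map some := by
  induction gs using pvPassA.induct with
  | case1 => rfl
  | case2 g => rfl
  | case3 g h' t hc ih => rw [pvPassA, if_pos hc] at h; simp at h
  | case4 g h' t hc ih =>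
    rw [pvPassA, if_neg (by tauto)] at h ⊢
    simp only [List.mem_cons, reduceCtorEq, false_or] at h
    simp [ih h]

theorem pvDedupGroup_eq (g : List (Int × Int)) (seen : List (Int × Int)) :
    pvDedupGroupA g seen = pvDedupGroupB g seen := by
  induction g generalizing seen with
  | nil => rfl
  | cons p t ih =>
    simp only [pvDedupGroupA, pvDedupGroupB, PySem.Set.contains, PySem.Set.add]
    by_cases hp : p ∈ seen <;> simp [hp, ih]

theorem pvDedup_eq (l : List (List (Int × Int))) (seen : List (Int × Int)) :
    pvDedupA l seen = pvDedupB l seen := by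
  induction l generalizing seen with
  | nil => rfl
  | cons g t ih => simp [pvDedupA, pvDedupB, ← pvDedupGroup_eq, ih]

theorem pvDedupGroupA_fresh (g : List (Int × Int)) (seen : List (Int × Int)) :
    (pvDedupGroupA g seen).1.Nodup ∧ ∀ p ∈ (pvDedupGroupA g seen).1, p ∉ seen := by
  induction g generalizing seen with
  | nil => simp [pvDedupGroupA]
  | cons p t ih =>
    simp only [pvDedupGroupA]
    by_cases hp : p ∈ seen
    · simpa [hp] using ih seen
    · have h' := ih (seen ++ [p])
      simp only [hp, if_false, List.nodup_cons]
      refine ⟨⟨fun hm => (h'.2 p hm) (by simp), h'.1⟩, ?_⟩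
      intro q hq
      rcases List.mem_cons.mp hq with rfl | hq'
      · exact hp
      · intro hs; exact h'.2 q hq' (by simp [hs])

theorem pvDedupGroupA_seen (g : List (Int × Int)) (seen : List (Int × Int)) :
    (pvDedupGroupA g seen).2 = seen ++ (pvDedupGroupA g seen).1 := by
  induction g generalizing seen with
  | nil => simp [pvDedupGroupA]
  | cons p t ih =>
    simp only [pvDedupGroupA]
    by_cases hp : p ∈ seen <;> simp [hp, ih]

theorem pvDedupGroupA_id (g : List (Int × Int)) (seen : List (Int × Int))
    (hn : g.Nodup) (hf : ∀ p ∈ g, p ∉ seen) :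
    pvDedupGroupA g seen = (g, seen ++ g) := by
  induction g generalizing seen with
  | nil => simp [pvDedupGroupA]
  | cons p t ih =>
    simp only [List.nodup_cons] at hn
    have hp : p ∉ seen := hf p (by simp)
    simp only [pvDedupGroupA, hp, if_false]
    rw [ih (seen ++ [p]) hn.2 (by
      intro q hq
      simp only [List.mem_append, List.mem_singleton]
      rintro (hs | rfl)
      · exact hf q (by simp [hq]) hs
      · exact hn.1 hq)]
    simp

theorem pvDedupA_fresh (l : List (List (Int × Int))) (seen : List (Int × Int)) :
    (pvDedupA l seen).1.flatten.Nodup ∧ ∀ p ∈ (pvDedupA l seen).1.flatten, p ∉ seen := by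
  induction l generalizing seen with
  | nil => simp [pvDedupA]
  | cons g t ih =>
    have hg := pvDedupGroupA_fresh g seen
    have ht := ih (pvDedupGroupA g seen).2
    have hseen := pvDedupGroupA_seen g seen
    simp only [pvDedupA, List.flatten_cons, List.nodup_append]
    constructor
    · refine ⟨hg.1, ht.1, ?_⟩
      intro a ha b hb hab
      exact ht.2 b hb (by rw [hseen]; exact List.mem_append.mpr (Or.inr (hab ▸ ha)))
    · intro p hp
      rcases List.mem_append.mp hp with h1 | h2
      · exact hg.2 p h1
      · exact fun hs => ht.2 p h2 (by rw [hseen]; exact List.mem_append.mpr (Or.inl hs))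

theorem pvDedupA_id (l : List (List (Int × Int))) (seen : List (Int × Int))
    (hn : l.flatten.Nodup) (hf : ∀ p ∈ l.flatten, p ∉ seen) :
    pvDedupA l seen = (l, seen ++ l.flatten) := by
  induction l generalizing seen with
  | nil => simp [pvDedupA]
  | cons g t ih =>
    simp only [List.flatten_cons, List.nodup_append] at hn
    simp only [List.flatten_cons, List.mem_append] at hf
    rw [pvDedupA]
    rw [pvDedupGroupA_id g seen hn.1 (fun p hp => hf p (Or.inl hp))]
    rw [ih (seen ++ g) hn.2.1 (by
      intro p hp
      simp only [List.mem_append]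
      rintro (hs | hg)
      · exact hf p (Or.inr hp) hs
      · exact hn.2.2 p hg p hp rfl)]
    simp

theorem pv_dedupA_idem (l : List (List (Int × Int))) :
    (pvDedupA (pvDedupA l []).1 []).1 = (pvDedupA l []).1 := by
  have h := pvDedupA_fresh l []
  rw [pvDedupA_id (pvDedupA l []).1 [] h.1 (by simp)]

theorem pv_loopB_eq (gs : List (List (Int × Int))) (h : (pvPassB gs).2 = true) :
    pvLoopB gs = pvLoopB (pvPassB gs).1 := by
  rw [pvLoopB]
  simp [h]

theorem pv_loopB_fix (gs : List (List (Int × Int))) (h : ¬ (pvPassB gs).2 = true) :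
    pvLoopB gs = (pvPassB gs).1 := by
  rw [pvLoopB]
  simp [h]

-- main equivalence (holds for every input of the ports), by the functional induction of A's recursion
theorem pv_main (gs : List (List (Int × Int))) :
    cat_time_groups gs = cat_time_groups_alt gs := by
  induction gs using cat_time_groups.induct with
  | case1 =>
    have h0 : pvLoopB [] = [] := by rw [pvLoopB]; simp [pvPassB]
    rw [cat_time_groups]
    simp [cat_time_groups_alt, h0, pvDedupB, PySem.Set.empty]
  | case2 x hx m ih =>
    have ih' : ∀ _ : none ∈ pvPassA x, cat_time_groups (List.filterMap id (pvPassA x)) = cat_time_groups_alt (List.filterMap id (pvPassA x)) := ih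
    rw [cat_time_groups]
    simp only [if_neg hx]
    by_cases hn : none ∈ pvPassA x
    · rw [dif_pos hn, ih' hn]
      unfold cat_time_groups_alt
      rw [pv_filterMap_passA, ← pv_loopB_eq x ((pv_flag_passA x).mpr hn)]
      rw [show (PySem.Set.empty : PySem.Set (Int × Int)) = [] from rfl]
      simp only [← pvDedup_eq]
      exact pv_dedupA_idem _
    · rw [dif_neg hn]
      have hflag : ¬ (pvPassB x).2 = true := fun h => hn ((pv_flag_passA x).mp h)
      unfold cat_time_groups_alt
      rw [pv_loopB_fix x hflag, ← pv_filterMap_passA, pv_passA_no_merge x hn]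
      rw [show (PySem.Set.empty : PySem.Set (Int × Int)) = [] from rfl, ← pvDedup_eq]
      simp [List.filterMap_map]

-- ===== VERDICT (by name: the statement is the Claim_ definition above) =====
theorem cat_time_groups_spec : Claim_equal_cat_time_groups := by
  intro groups _ _
  unfold Spec_cat_time_groups
  exact pv_main groups

theorem cat_time_groups_raises : Claim_raises_cat_time_groups := by
  unfold Claim_raises_cat_time_groups
  refine ⟨fun g _ hr hp => hp.1 hr, by decide, by decide, ?_⟩
  have h0 : pvLoopB [] = [] := by rw [pvLoopB]; simp [pvPassB]
  simp [cat_time_groups_alt, pvRaiseWitness_cat_time_groups, pvRaiseWitnessOut_cat_time_groups,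
    h0, pvDedupB]

-- self-check that the crash-fix witness value is the one the theorem pins down
theorem pvRaiseWitnessValue_ok :
    cat_time_groups_alt pvRaiseWitness_cat_time_groups = pvRaiseWitnessOut_cat_time_groups :=
  cat_time_groups_raises.2.2.2
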